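-- pv_equiv track=rewrite | github.com/yubinbai/pcuva-problems | UVa 957 - Popes/main.py | solve
-- ===== SOURCE A (Python) =====
-- from bisect import bisect
--
-- def solve(par):
--     Y, P, popes = par
--     left, right, maxP = -1, -1, -1
--     for i1, p1 in enumerate(popes):
--         if p1 + Y - 1 > popes[-1]:
--             break
--         i2 = bisect(popes, p1 + Y - 1, lo=i1 + 1, hi=P)
--         if i2 - i1 > maxP:
--             left, right, maxP = i1, i2 - 1, i2 - i1
--
--     return '%d %d %d' % (maxP, popes[left], popes[right])
-- ===== SOURCE B (Python) =====
-- def solve(par):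
--     Y, P, popes = par
--     last = popes[-1]
--     n = len(popes)
--     hi = P if P < n else n
--     j = 0
--     left = right = maxP = -1
--     for i, p in enumerate(popes):
--         x = p + Y - 1
--         if x > last:
--             break
--         while j < hi and popes[j] <= x:
--             j += 1
--         m = j if j > i else i + 1
--         if m - i > maxP:
--             left, right, maxP = i, m - 1, m - i
--     return '%d %d %d' % (maxP, popes[left], popes[right])
-- ===== Notes on version B (the rewrite author's own statement) =====
-- stated objective: alternative
-- what changed: The per-start binary search (bisect with lo=i+1, hi=P) is replaced by one shared two-pointer clamped into [i+1, min(P, len(popes))], which advances monotonically over the sorted list (O(1) amortized per start instead of O(log n)); C-coded bisect keeps A's constant low, so a timing run did not confirm a speedup.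
-- outside the precondition, e.g. on solve((2, -1, [0, 1])): A returns '2 0 1', B returns '1 0 0'; on solve((2, 3, [0, 6, 1])): A returns '3 0 1', B returns '1 0 0'; on solve((8, 7, [-9, -4, -1, 1, 8, 9])): A returns '3 -4 1', B returns '3 -4 1'
import Mathlib
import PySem

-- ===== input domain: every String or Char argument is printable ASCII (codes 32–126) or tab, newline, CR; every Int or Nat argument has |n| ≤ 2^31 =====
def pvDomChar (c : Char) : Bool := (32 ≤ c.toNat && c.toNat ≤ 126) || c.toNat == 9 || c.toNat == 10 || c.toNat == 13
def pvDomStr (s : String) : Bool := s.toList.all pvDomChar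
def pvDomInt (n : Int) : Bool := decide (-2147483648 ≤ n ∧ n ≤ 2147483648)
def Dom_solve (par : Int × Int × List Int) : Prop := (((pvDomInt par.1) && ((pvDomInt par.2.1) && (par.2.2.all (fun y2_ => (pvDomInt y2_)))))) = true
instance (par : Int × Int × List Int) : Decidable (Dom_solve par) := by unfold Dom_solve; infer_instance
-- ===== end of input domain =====

-- B replaces A's per-start binary search (bisect with lo=i+1, hi=P) by one shared two-pointer clamped to [i+1, min(P, len)]: a different traversal of the same scan.

-- ===== PORT A =====
-- bisect(popes, x, lo, hi) is ported by PySem.List.bisectRightLoop (CPython's bisect_right loop with lo/hi, fuel = length).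
def loopA (Y P : Int) (popes : List Int) : List (Int × Int) → (Int × Int × Int) → (Int × Int × Int)
  | [], s => s
  | (i1, p1) :: rest, s =>
    if p1 + Y - 1 > PySem.List.pyGetD popes (-1) 0 then s
    else
      let i2 : Int := ((PySem.List.bisectRightLoop popes (p1 + Y - 1) popes.length (i1 + 1).toNat P.toNat : Nat) : Int)
      let s' := if i2 - i1 > s.2.2 then (i1, i2 - 1, i2 - i1) else s
      loopA Y P popes rest s'

def solve (par : Int × Int × List Int) : String :=
  let Y := par.1
  let P := par.2.1
  let popes := par.2.2
  let s := loopA Y P popes (PySem.List.enumerate popes 0) (-1, -1, -1)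
  PySem.Int.toStr s.2.2 ++ " " ++ PySem.Int.toStr (PySem.List.pyGetD popes s.1 0) ++ " " ++
    PySem.Int.toStr (PySem.List.pyGetD popes s.2.1 0)

-- ===== PORT B =====
-- Source B's 'while j < hi and popes[j] <= p + Y - 1: j += 1' (fuel = length - j).
def whileB (popes : List Int) (hi bound : Int) : Nat → Nat → Nat
  | 0, j => j
  | fuel + 1, j => if (j : Int) < hi ∧ popes.getD j 0 ≤ bound then whileB popes hi bound fuel (j + 1) else j

def loopB (Y : Int) (popes : List Int) (last hi : Int) : List (Int × Int) → Nat → (Int × Int × Int) → (Int × Int × Int)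
  | [], _, s => s
  | (i, p) :: rest, j, s =>
    let x := p + Y - 1
    if x > last then s
    else
      let j' := whileB popes hi x (popes.length - j) j
      let m : Int := if (j' : Int) > i then (j' : Int) else i + 1
      let s' := if m - i > s.2.2 then (i, m - 1, m - i) else s
      loopB Y popes last hi rest j' s'

def solve_alt (par : Int × Int × List Int) : String :=
  let Y := par.1
  let P := par.2.1
  let popes := par.2.2
  let last := PySem.List.pyGetD popes (-1) 0
  let n := popes.length
  let hi := if P < (n : Int) then P else (n : Int)
  let s := loopB Y popes last hi (PySem.List.enumerate popes 0) 0 (-1, -1, -1)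
  PySem.Int.toStr s.2.2 ++ " " ++ PySem.Int.toStr (PySem.List.pyGetD popes s.1 0) ++ " " ++
    PySem.Int.toStr (PySem.List.pyGetD popes s.2.1 0)

-- ===== PRECONDITION & SPEC =====
-- Pre_ excludes empty popes (A raises IndexError on popes[-1]) and — except when the scan breaks at the very
-- first pope, where both programs return the sentinel answer untouched — it excludes unsorted popes (bisect's
-- value on unsorted input is an accident of the binary descent), P > len(popes) (bisect may raise IndexError
-- there), and P = -1 (C bisect treats hi = -1 as the sentinel for len(a), a quirk A's caller never exercises).
def Pre_solve (par : Int × Int × List Int) : Prop :=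
  par.2.2 ≠ [] ∧
    ((List.IsChain (· ≤ ·) par.2.2 ∧ par.2.1 ≤ (par.2.2.length : Int) ∧ par.2.1 ≠ -1) ∨
      par.2.2.getD 0 0 + par.1 - 1 > par.2.2.getD (par.2.2.length - 1) 0)
instance (par : Int × Int × List Int) : Decidable (Pre_solve par) := by unfold Pre_solve; infer_instance

def pvWitness_solve : (Int × Int × List Int) := (100, 3, [1492, 1503, 1600])

def Spec_solve (par : Int × Int × List Int) (out : String) : Prop := out = solve_alt par
instance (par : Int × Int × List Int) (out : String) : Decidable (Spec_solve par out) := by unfold Spec_solve; infer_instance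

-- ===== CLAIM (what is proved, stated in full; the proofs are below) =====
def Claim_equal_solve : Prop := ∀ (par : Int × Int × List Int), Dom_solve par → Pre_solve par → Spec_solve par (solve par)

-- ===== LEMMAS AND PROOFS =====

-- glue: getD at an in-range index is the element
theorem getD_eq_get (xs : List Int) {j : Nat} (h : j < xs.length) : xs.getD j 0 = xs[j] := by
  simp [List.getD_eq_getElem?_getD, List.getElem?_eq_getElem h]

-- an index k with popes[k] ≤ x lies strictly below the bisection point
theorem lt_bisectRight_of_le (xs : List Int) (x : Int) (hs : List.Pairwise (· ≤ ·) xs)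
    (k : Nat) (hk : k < xs.length) (hle : xs[k] ≤ x) : k < PySem.List.bisectRight xs x := by
  by_contra h
  exact absurd hle (not_le.mpr ((PySem.List.bisectRight_spec xs x hs).2.2 k hk (Nat.le_of_not_lt h)))

theorem bisectRight_mono (xs : List Int) (hs : List.Pairwise (· ≤ ·) xs)
    {x x' : Int} (h : x ≤ x') : PySem.List.bisectRight xs x ≤ PySem.List.bisectRight xs x' := by
  by_contra hlt
  have hlt := Nat.lt_of_not_le hlt
  have h1 := (PySem.List.bisectRight_spec xs x hs).1
  have hr : PySem.List.bisectRight xs x' < xs.length := Nat.lt_of_lt_of_le hlt h1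
  have hle : xs[PySem.List.bisectRight xs x'] ≤ x :=
    (PySem.List.bisectRight_spec xs x hs).2.1 _ hr hlt
  have hgt : x' < xs[PySem.List.bisectRight xs x'] :=
    (PySem.List.bisectRight_spec xs x' hs).2.2 _ hr (Nat.le_refl _)
  omega

-- A's bounded bisect loop on a sorted list clamps the full bisection point into [lo, hi]
theorem bisectLoop_clamp (xs : List Int) (x : Int) (hs : List.Pairwise (· ≤ ·) xs) :
    ∀ (fuel lo hi : Nat), hi ≤ xs.length → hi - lo ≤ fuel →
      PySem.List.bisectRightLoop xs x fuel lo hi = max lo (min (PySem.List.bisectRight xs x) hi) := by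
  intro fuel
  induction fuel with
  | zero => intro lo hi h1 h2; simp only [PySem.List.bisectRightLoop]; omega
  | succ n ih =>
    intro lo hi h1 h2
    simp only [PySem.List.bisectRightLoop]
    by_cases hlh : lo < hi
    · have hmid : (lo + hi) / 2 < xs.length := by omega
      simp only [hlh, if_true, List.getElem?_eq_getElem hmid]
      by_cases hx : x < xs[(lo + hi) / 2]
      · simp only [hx, if_true]
        have ht : PySem.List.bisectRight xs x ≤ (lo + hi) / 2 := by
          by_contra hc
          have := (PySem.List.bisectRight_spec xs x hs).2.1 _ hmid (Nat.lt_of_not_le hc)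
          omega
        rw [ih lo ((lo + hi) / 2) (by omega) (by omega)]
        omega
      · simp only [hx, if_false]
        have ht : (lo + hi) / 2 < PySem.List.bisectRight xs x :=
          lt_bisectRight_of_le xs x hs _ hmid (by omega)
        rw [ih ((lo + hi) / 2 + 1) hi h1 (by omega)]
        omega
    · simp only [hlh, if_false]
      have := (PySem.List.bisectRight_spec xs x hs).1
      omega

-- B's while loop computes the bisection point capped at hi, starting from any j below it
theorem whileB_char (xs : List Int) (hi x : Int) (hs : List.Pairwise (· ≤ ·) xs)
    (hhi : hi ≤ (xs.length : Int)) :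
    ∀ (fuel j : Nat), j ≤ min (PySem.List.bisectRight xs x) hi.toNat → xs.length - j ≤ fuel →
      whileB xs hi x fuel j = min (PySem.List.bisectRight xs x) hi.toNat := by
  intro fuel
  have hlen := (PySem.List.bisectRight_spec xs x hs).1
  induction fuel with
  | zero => intro j h1 h2; simp only [whileB]; omega
  | succ n ih =>
    intro j h1 h2
    simp only [whileB]
    by_cases hc : (j : Int) < hi ∧ xs.getD j 0 ≤ x
    · simp only [hc]
      have hjl : j < xs.length := by omega
      have hjx : xs[j] ≤ x := by
        have := hc.2; rwa [getD_eq_get xs hjl] at this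
      have hjt : j < PySem.List.bisectRight xs x := lt_bisectRight_of_le xs x hs j hjl hjx
      exact ih (j + 1) (by omega) (by omega)
    · simp only [hc, if_false]
      rcases not_and_or.mp hc with hjh | hjx
      · omega
      · by_cases hjl : j < xs.length
        · have hxj : x < xs[j] := by
            have := lt_of_not_ge (fun hle => hjx (by rwa [getD_eq_get xs hjl]))
            exact this
          have ht : PySem.List.bisectRight xs x ≤ j := by
            by_contra hcc
            have := (PySem.List.bisectRight_spec xs x hs).2.1 j hjl (Nat.lt_of_not_le hcc)
            omega
          omega
        · omega

-- sorted list: values are monotone in the index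
theorem getElem_mono (xs : List Int) (hs : List.Pairwise (· ≤ ·) xs)
    {a b : Nat} (hab : a ≤ b) (hb : b < xs.length) : xs[a]'(by omega) ≤ xs[b] := by
  rcases Nat.lt_or_ge a b with h | h
  · exact (List.pairwise_iff_getElem.mp hs) a b (by omega) hb h
  · have : a = b := by omega
    subst this; exact le_refl _

-- the two loops agree step by step: at each surviving index A's clamped bisect and B's clamped pointer coincide
theorem loops_eq (Y P hi : Int) (popes : List Int) (hs : List.Pairwise (· ≤ ·) popes)
    (hP : P ≤ (popes.length : Int)) (hieq : hi = min P (popes.length : Int)) :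
    ∀ (l : List (Int × Int)) (j : Nat) (s : Int × Int × Int),
      (∀ pr ∈ l, ∃ k : Nat, k < popes.length ∧ pr.1 = (k : Int) ∧ pr.2 = popes.getD k 0) →
      List.Pairwise (fun a b => a.1 < b.1) l →
      (∀ pr ∈ l, j ≤ min (PySem.List.bisectRight popes (pr.2 + Y - 1)) P.toNat) →
      loopA Y P popes l s =
        loopB Y popes (PySem.List.pyGetD popes (-1) 0) hi l j s := by
  subst hieq
  have hmin : (min P (popes.length : Int)).toNat = P.toNat := by omega
  have hminle : min P (popes.length : Int) ≤ (popes.length : Int) := by omega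
  intro l
  induction l with
  | nil => intro j s _ _ _; rfl
  | cons hd tl ih =>
    intro j s hmem hpw hj
    obtain ⟨k, hk, hfst, hsnd⟩ := hmem hd (List.mem_cons_self)
    obtain ⟨i1, p1⟩ := hd
    simp only at hfst hsnd
    subst hfst hsnd
    simp only [loopA, loopB]
    by_cases hbr : popes.getD k 0 + Y - 1 > PySem.List.pyGetD popes (-1) 0
    · simp only [if_pos hbr]
    · simp only [if_neg hbr]
      set x := popes.getD k 0 + Y - 1 with hx
      set t := PySem.List.bisectRight popes x with hts
      have hbis : ((PySem.List.bisectRightLoop popes x popes.length ((k : Int) + 1).toNat P.toNat : Nat) : Int)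
          = (max (k + 1) (min t P.toNat) : Nat) := by
        have h1 : ((k : Int) + 1).toNat = k + 1 := by omega
        rw [h1, bisectLoop_clamp popes x hs popes.length (k + 1) P.toNat (by omega) (by omega)]
      have hw : whileB popes (min P (popes.length : Int)) x (popes.length - j) j = min t P.toNat := by
        rw [← hmin]
        exact whileB_char popes (min P (popes.length : Int)) x hs hminle (popes.length - j) j
          (by rw [hmin]; exact hj (↑k, popes.getD k 0) (List.mem_cons_self)) (Nat.le_refl _)
      rw [hbis, hw]
      have hm : (if ((min t P.toNat : Nat) : Int) > (k : Int) then ((min t P.toNat : Nat) : Int)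
          else (k : Int) + 1) = ((max (k + 1) (min t P.toNat) : Nat) : Int) := by
        split_ifs <;> push_cast <;> omega
      rw [hm]
      apply ih
      · intro pr hpr; exact hmem pr (List.mem_cons_of_mem _ hpr)
      · exact hpw.sublist (List.sublist_cons_self _ _)
      · -- invariant: the advanced pointer stays below every later clamped bisection point
        intro pr hpr
        obtain ⟨k', hk', hf', hs'⟩ := hmem pr (List.mem_cons_of_mem _ hpr)
        have hkk' : (k : Int) < (k' : Int) := by
          have := (List.pairwise_cons.mp hpw).1 pr hpr
          rw [hf'] at this; exact this
        have hxle : x ≤ pr.2 + Y - 1 := by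
          rw [hs', hx]
          have : popes.getD k 0 ≤ popes.getD k' 0 := by
            rw [getD_eq_get popes hk, getD_eq_get popes hk']
            exact getElem_mono popes hs (by omega) hk'
          omega
        have := bisectRight_mono popes hs hxle
        omega

-- enumerate gives in-range indices with their values
theorem enumerate_facts (popes : List Int) :
    ∀ pr ∈ PySem.List.enumerate popes 0, ∃ k : Nat, k < popes.length ∧ pr.1 = (k : Int) ∧ pr.2 = popes.getD k 0 := by
  intro pr hpr
  rw [PySem.List.mem_enumerate_iff] at hpr
  obtain ⟨k, hk, rfl⟩ := hpr
  exact ⟨k, hk, by simp, (getD_eq_get popes hk).symm⟩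

-- popes[-1] is the last element, i.e. the one at index len - 1
theorem pyLast_eq (popes : List Int) (h : popes ≠ []) :
    PySem.List.pyGetD popes (-1) 0 = popes.getD (popes.length - 1) 0 := by
  have hl : 0 < popes.length := List.length_pos_iff.mpr h
  rw [PySem.List.pyGetD_neg_ofNat popes 1 0 (by omega) (by omega), getD_eq_get popes (by omega)]

-- ===== VERDICT (by name: the statement is the Claim_ definition above) =====
theorem solve_spec : Claim_equal_solve := by
  intro par _ hpre
  obtain ⟨Y, P, popes⟩ := par
  obtain ⟨hne, hrest⟩ := hpre
  simp only at hne hrest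
  unfold Spec_solve solve solve_alt
  simp only
  rcases hrest with ⟨hch, hP, -⟩ | hbr0
  · have hs : List.Pairwise (· ≤ ·) popes := List.isChain_iff_pairwise.mp hch
    rw [loops_eq Y P (if P < (popes.length : Int) then P else (popes.length : Int)) popes hs hP
      (by split_ifs <;> omega) (PySem.List.enumerate popes 0) 0 (-1, -1, -1)
      (enumerate_facts popes) (PySem.List.pairwise_lt_enumerate popes 0) (fun _ _ => Nat.zero_le _)]
  · -- the scan breaks at the very first pope in both programs
    cases popes with
    | nil => exact absurd rfl hne
    | cons p0 tl =>
      have hb : p0 + Y - 1 > PySem.List.pyGetD (p0 :: tl) (-1) 0 := by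
        rw [pyLast_eq (p0 :: tl) (by simp)]
        simpa using hbr0
      rw [PySem.List.enumerate_cons]
      simp only [loopA, loopB, if_pos hb]
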